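-- pv_equiv track=rewrite | github.com/keras-team/keras | examples/headline_generation.py | gen_Xy_pairs
-- ===== SOURCE A (Python) =====
-- def gen_Xy_pairs(bodies, headlines, maxlen):
--     """Prep inputs into fixed-length X, y pairs.
--
--     Create X, y pairs for each body/headline pair. For the first ob. from
--     each body/headline pair, take the first `maxlen` words of the body followed by an
--     EOS (0 in the `idx_word_dct`) for X and the first word of the headline for y.
--     Generate subsequent X's by stepping through the previous X by one word, and
--     tacking the previous y onto the end. Generate subsequent y's by stepping through
--     the headline, stopping when the end of the headline is reached.
--     """
--
--     Xs, ys = [], []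
--     for body, headline in zip(bodies, headlines):
--         # Add the EOS into the headline.
--         headline.append(0)
--         if len(body) > len(headline) + maxlen:
--             for idx, word in enumerate(headline):
--                 # Grab the words we want from the body, append the EOS, and tack on
--                 # any words of the headline that should be added.
--                 X = body[idx:maxlen] + [0] + headline[:idx]
--                 y = headline[idx]
--                 Xs.append(X)
--                 ys.append(y)
--
--     return Xs, ys
-- ===== SOURCE B (Python) =====
-- def gen_Xy_pairs(bodies, headlines, maxlen):
--     """Prep inputs into fixed-length X, y pairs.
--
--     Same contract as the original, but instead of re-slicing
--     body[idx:maxlen] + [0] + headline[:idx] at every step, maintain a running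
--     window: a shrinking body prefix and a growing headline tail, updated
--     incrementally as we walk the headline once.
--     """
--     Xs, ys = [], []
--     for body, headline in zip(bodies, headlines):
--         # Add the EOS into the headline (same observable mutation as before).
--         headline.append(0)
--         if len(body) > len(headline) + maxlen:
--             prefix = body[:maxlen]
--             tail = []
--             for word in headline:
--                 Xs.append(prefix + [0] + tail)
--                 ys.append(word)
--                 if prefix:
--                     prefix = prefix[1:]
--                 tail = tail + [word]
--     return Xs, ys
-- ===== Notes on version B (the rewrite author's own statement) =====
-- stated objective: alternative
-- what changed: Instead of recomputing body[idx:maxlen] + [0] + headline[:idx] by slicing at every inner step, B maintains a running window (a shrinking body prefix popped from the front and a growing headline tail) updated incrementally in one walk over the headline.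
import Mathlib
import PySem

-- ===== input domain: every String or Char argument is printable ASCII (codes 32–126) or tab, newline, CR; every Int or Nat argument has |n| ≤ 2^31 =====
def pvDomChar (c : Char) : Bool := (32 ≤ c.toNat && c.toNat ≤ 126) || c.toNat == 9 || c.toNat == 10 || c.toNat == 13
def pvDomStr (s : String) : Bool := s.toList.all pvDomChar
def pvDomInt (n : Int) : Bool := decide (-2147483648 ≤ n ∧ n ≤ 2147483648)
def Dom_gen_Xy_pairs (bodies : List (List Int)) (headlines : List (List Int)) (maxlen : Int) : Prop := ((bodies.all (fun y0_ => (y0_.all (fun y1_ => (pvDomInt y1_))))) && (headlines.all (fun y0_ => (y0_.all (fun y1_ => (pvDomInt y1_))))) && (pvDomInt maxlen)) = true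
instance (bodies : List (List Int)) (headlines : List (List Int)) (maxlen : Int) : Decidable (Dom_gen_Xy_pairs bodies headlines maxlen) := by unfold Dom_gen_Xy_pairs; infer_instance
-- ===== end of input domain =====

-- B replaces the per-step re-slicing body[idx:maxlen] + [0] + headline[:idx] by an incrementally
-- maintained window (shrinking body prefix, growing headline tail); equivalence is about the RETURN
-- value (both Pythons mutate each headline by appending 0 identically).

-- ===== PORT A =====
def gen_Xy_pairs (bodies : List (List Int)) (headlines : List (List Int)) (maxlen : Int) : List (List Int) × List Int :=
  (bodies.zip headlines).foldl
    (fun acc p =>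
      let body := p.1
      let headline := p.2 ++ [0]          -- headline.append(0)
      if (body.length : Int) > (headline.length : Int) + maxlen then
        (PySem.List.enumerate headline).foldl
          (fun acc2 iw =>
            let X := PySem.List.slice body (some iw.1) (some maxlen) ++ [0] ++
                     PySem.List.slice headline none (some iw.1)
            (acc2.1 ++ [X], acc2.2 ++ [iw.2]))
          acc
      else acc)
    ([], [])

-- ===== PORT B =====
def gen_Xy_pairs_alt (bodies : List (List Int)) (headlines : List (List Int)) (maxlen : Int) : List (List Int) × List Int :=
  (bodies.zip headlines).foldl
    (fun acc p =>
      let body := p.1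
      let headline := p.2 ++ [0]          -- headline.append(0)
      if (body.length : Int) > (headline.length : Int) + maxlen then
        (headline.foldl
          (fun (st : (List (List Int) × List Int) × List Int × List Int) word =>
            ((st.1.1 ++ [st.2.1 ++ [0] ++ st.2.2], st.1.2 ++ [word]),
             (if st.2.1.isEmpty then st.2.1 else st.2.1.tail),   -- if prefix: prefix = prefix[1:]
             st.2.2 ++ [word]))                                  -- tail = tail + [word]
          (acc, PySem.List.slice body none (some maxlen), [])).1
      else acc)
    ([], [])

-- ===== PRECONDITION & SPEC =====
def Spec_gen_Xy_pairs (bodies : List (List Int)) (headlines : List (List Int)) (maxlen : Int) (out : List (List Int) × List Int) : Prop := out = gen_Xy_pairs_alt bodies headlines maxlen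
instance (bodies : List (List Int)) (headlines : List (List Int)) (maxlen : Int) (out : List (List Int) × List Int) : Decidable (Spec_gen_Xy_pairs bodies headlines maxlen out) := by unfold Spec_gen_Xy_pairs; infer_instance

-- ===== CLAIM (what is proved, stated in full; the proofs are below) =====
def Claim_equal_gen_Xy_pairs : Prop := ∀ (bodies : List (List Int)) (headlines : List (List Int)) (maxlen : Int), Dom_gen_Xy_pairs bodies headlines maxlen → Spec_gen_Xy_pairs bodies headlines maxlen (gen_Xy_pairs bodies headlines maxlen)

-- ===== LEMMAS AND PROOFS =====

-- body[k:maxlen] is the k-step front-drop of body[:maxlen] (any maxlen, k a natural index).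
theorem pv_slice_fromNat (xs : List Int) (k : Nat) (b : Int) :
    PySem.List.slice xs (some (k:Int)) (some b) = (PySem.List.slice xs none (some b)).drop k := by
  simp only [PySem.List.slice, PySem.List.clampIdx]
  have hk : ¬ ((k:Int) < 0) := by omega
  rw [if_neg hk, List.drop_take, Int.toNat_natCast, List.drop_zero, Nat.sub_zero]
  rcases le_or_gt k xs.length with h | h
  · rw [min_eq_left h]
  · rw [min_eq_right h.le, List.drop_length, List.drop_eq_nil_of_le h.le, List.take_nil, List.take_nil]

-- The inner-loop invariant: at position k, B's prefix is body[:maxlen] dropped k times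
-- and B's tail is the first k headline words.
theorem pv_inner_eq (body : List Int) (maxlen : Int) (H : List Int) :
    ∀ (h : List Int) (k : Nat) (acc : List (List Int) × List Int), h = H.drop k →
      (PySem.List.enumerate h (k:Int)).foldl
        (fun acc2 iw =>
          let X := PySem.List.slice body (some iw.1) (some maxlen) ++ [0] ++
                   PySem.List.slice H none (some iw.1)
          (acc2.1 ++ [X], acc2.2 ++ [iw.2])) acc
      = (h.foldl
          (fun (st : (List (List Int) × List Int) × List Int × List Int) word =>
            ((st.1.1 ++ [st.2.1 ++ [0] ++ st.2.2], st.1.2 ++ [word]),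
             (if st.2.1.isEmpty then st.2.1 else st.2.1.tail),
             st.2.2 ++ [word]))
          (acc, (PySem.List.slice body none (some maxlen)).drop k, H.take k)).1 := by
  intro h
  induction h with
  | nil => intro k acc _; simp [PySem.List.enumerate_nil]
  | cons w t ih =>
    intro k acc hk
    have hdrop1 : t = H.drop (k+1) := by
      have h1 : (H.drop k).tail = H.drop (k+1) := List.tail_drop
      rw [← h1, ← hk]; rfl
    have htake1 : H.take (k+1) = H.take k ++ [w] := by
      rw [List.take_add, ← hk]; rfl
    have hpref : ∀ (P : List Int),
        (if (P.drop k).isEmpty then P.drop k else (P.drop k).tail) = P.drop (k+1) := by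
      intro P
      have h1 : (P.drop k).tail = P.drop (k+1) := List.tail_drop
      rcases hP : P.drop k with _ | ⟨x, xs⟩
      · rw [hP] at h1; simpa using h1.symm
      · rw [hP] at h1; simpa using h1
    rw [PySem.List.enumerate_cons, List.foldl_cons, List.foldl_cons]
    simp only [pv_slice_fromNat body k maxlen, PySem.List.slice_to_natCast]
    have hcast : ((k:Int) + 1) = (((k+1 : Nat)):Int) := by push_cast; ring
    rw [hcast, ih (k+1) _ hdrop1, hpref, htake1]

-- ===== VERDICT (by name: the statement is the Claim_ definition above) =====
theorem gen_Xy_pairs_spec : Claim_equal_gen_Xy_pairs := by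
  intro bodies headlines maxlen _
  unfold Spec_gen_Xy_pairs gen_Xy_pairs gen_Xy_pairs_alt
  apply List.foldl_ext
  intro acc p _
  simp only []
  by_cases hg : ((p.1.length : Int) > ((p.2 ++ [0]).length : Int) + maxlen)
  · rw [if_pos hg, if_pos hg]
    have := pv_inner_eq p.1 maxlen (p.2 ++ [0]) (p.2 ++ [0]) 0 acc (by simp)
    simpa using this
  · rw [if_neg hg, if_neg hg]
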